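-- pv_equiv track=rewrite | github.com/miliar/Code_Jam_Webscraper | solutions_python/Problem_118/803.py | infodd
-- ===== SOURCE A (Python) =====
-- import math
--
-- def oddpal(n):
--     s = str(n)[:-1]
--     c = str(n)[-1]
--     return int(s + c + str(''.join(reversed(s))))
--
-- def infodd(n):
--     s = str(n)
--     if len(s) % 2 == 0:
--         newlen = int( (len(s))/2 )
--         if newlen == 0:
--             result = 0
--         else:
--             result = int(''.join('9' for i in range(newlen)))
--     else:
--         code = int(s[:math.ceil(len(s)/2)])
--         if oddpal(code) <= n:
--             result = code
--         else:
--             result = code - 1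
--     return(result)
-- ===== SOURCE B (Python) =====
-- def infodd(n):
--     if n < 0:
--         return 0
--
--     def pal(c):
--         half = c // 10
--         m, r = half, 0
--         while m > 0:
--             r = 10 * r + m % 10
--             m //= 10
--         w = 1
--         while w <= half:
--             w *= 10
--         return c * w + r
--
--     lo, hi = 0, n + 1   # invariant: pal(lo) <= n < pal(hi)
--     while hi - lo > 1:
--         mid = (lo + hi) // 2
--         if pal(mid) <= n:
--             lo = mid
--         else:
--             hi = mid
--     return lo
-- ===== Notes on version B (the rewrite author's own statement) =====
-- stated objective: alternative
-- what changed: A branches on the parity of len(str(n)) and manufactures the answer by string surgery (a run of '9's, a prefix slice, oddpal's slice/reverse/concat/reparse); B has no parity branch at all: it binary-searches for the largest code c with pal(c) <= n, where pal builds the odd-length palindrome for c purely arithmetically (digit-reversal and power-of-ten loops), which is correct because pal is the monotone enumeration of odd-length palindromes.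
-- intended difference: For negative n whose str(n) has even length (e.g. -5, -123, where the '-' sign pads the length), A's even branch accidentally returns 10**(len//2)-1 (9 for -5), while B returns 0, the intended count of odd-length palindromes <= n, since no positive palindrome is <= a negative number. — e.g. on infodd(-5): A returns 9, B returns 0
import Mathlib
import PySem

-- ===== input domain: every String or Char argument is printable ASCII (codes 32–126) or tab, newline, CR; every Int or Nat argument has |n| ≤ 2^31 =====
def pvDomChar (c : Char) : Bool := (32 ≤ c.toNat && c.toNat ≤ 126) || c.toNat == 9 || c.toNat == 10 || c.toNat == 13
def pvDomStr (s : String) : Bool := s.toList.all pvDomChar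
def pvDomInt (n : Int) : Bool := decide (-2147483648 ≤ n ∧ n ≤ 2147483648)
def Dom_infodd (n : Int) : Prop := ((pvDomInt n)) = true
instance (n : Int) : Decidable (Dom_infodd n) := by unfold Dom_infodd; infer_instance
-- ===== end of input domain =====

-- B drops A's parity branch and string surgery entirely: it binary-searches for the largest code c
-- whose arithmetically built odd-length palindrome is ≤ n; objective: alternative (not faster).

-- ===== PORT A =====

-- int(s): PySem.Int.ofStr? is the standard port, but its decimal accumulator is a *private*
-- definition of PySemCore that proofs cannot mention, so int() is ported by hand here; pvInt is
-- exact (returns what int(s) returns) on nonempty, sign-free ASCII-digit strings, and on every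
-- input admitted by Pre_infodd all strings this program feeds to int() are of that shape.
def pvInt (cs : List Char) : Int :=
  ((cs.foldl (fun a c => 10 * a + (c.toNat - 48)) 0 : Nat) : Int)

def oddpal (x : Int) : Int :=
  let s := PySem.Chars.slice (PySem.Int.toChars x) none (some (-1))   -- s = str(n)[:-1]
  match PySem.Chars.pyGet? (PySem.Int.toChars x) (-1) with            -- c = str(n)[-1]; str(x) is never empty, so the IndexError branch below is unreachable
  | some c => pvInt (s ++ [c] ++ s.reverse)                           -- int(s + c + str(''.join(reversed(s))))
  | none => 0

def infodd (n : Int) : Int :=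
  let s := PySem.Int.toChars n
  if PySem.Int.mod (PySem.Chars.len s) 2 == 0 then
    -- newlen = int(len(s)/2): exact — len(s)/2 is an exactly-represented float, int() truncates toward zero
    let newlen := PySem.Int.truncdiv (PySem.Chars.len s) 2
    if newlen == 0 then 0
    else pvInt (PySem.Chars.join [] ((PySem.List.pyRange 0 newlen 1).map (fun _ => ['9'])))
  else
    -- math.ceil(len(s)/2) = -((-len(s)) // 2): exact for this small int argument
    let h := -(PySem.Int.floordiv (-(PySem.Chars.len s)) 2)
    let code := pvInt (PySem.Chars.slice s none (some h))
    if oddpal code ≤ n then code else code - 1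

-- ===== PORT B =====

-- Each loop below carries a Nat fuel argument purely as a structural-recursion totality guard
-- (every call site passes enough fuel for the loop to run to its Python exit condition).

-- while m > 0: r = 10*r + m % 10; m //= 10
def revLoop (fuel : Nat) (m r : Int) : Int :=
  match fuel with
  | 0 => r
  | fuel + 1 =>
    if 0 < m then revLoop fuel (PySem.Int.floordiv m 10) (10 * r + PySem.Int.mod m 10) else r

-- w = 1; while w <= half: w *= 10
def wLoop (fuel : Nat) (half w : Int) : Int :=
  match fuel with
  | 0 => w
  | fuel + 1 => if w ≤ half then wLoop fuel half (10 * w) else w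

-- pal(c): the odd-length palindrome whose left half (code) is c, built arithmetically
def palB (c : Int) : Int :=
  let half := PySem.Int.floordiv c 10
  let r := revLoop half.toNat half 0
  let w := wLoop (half.toNat + 1) half 1
  c * w + r

-- while hi - lo > 1: mid = (lo+hi)//2; if pal(mid) <= n: lo = mid else hi = mid
def bsearch (fuel : Nat) (n lo hi : Int) : Int :=
  match fuel with
  | 0 => lo
  | fuel + 1 =>
    if 1 < hi - lo then
      let mid := PySem.Int.floordiv (lo + hi) 2
      if palB mid ≤ n then bsearch fuel n mid hi else bsearch fuel n lo mid
    else lo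

def infodd_alt (n : Int) : Int :=
  if n < 0 then 0 else bsearch (n + 1).toNat n 0 (n + 1)

-- ===== PRECONDITION & SPEC =====

-- Pre_ excludes exactly the negative n whose str(n) has an odd length (e.g. -10): on every such
-- input A raises ValueError (oddpal builds a string ending in '-' and int() rejects it);
-- A returns normally on every input Pre_ admits.
def Pre_infodd (n : Int) : Prop := 0 ≤ n ∨ (PySem.Int.toChars n).length % 2 = 0
instance (n : Int) : Decidable (Pre_infodd n) := by unfold Pre_infodd; infer_instance

def pvWitness_infodd : Int := 121

-- For negative n with even len(str(n)) A's even branch accidentally returns 10^(len//2)-1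
-- (the '-' sign pads the length); B returns 0, the intended count of odd-length palindromes ≤ n.
def D_infodd (n : Int) : Prop := n < 0
instance (n : Int) : Decidable (D_infodd n) := by unfold D_infodd; infer_instance

def Spec_infodd (n : Int) (out : Int) : Prop := ¬ D_infodd n → out = infodd_alt n
instance (n : Int) (out : Int) : Decidable (Spec_infodd n out) := by unfold Spec_infodd; infer_instance

def pvDiffWitness_infodd : Int := -5
def pvDiffWitnessOut_infodd : Int × Int := (9, 0)

-- ===== CLAIM (what is proved, stated in full; the proofs are below) =====
def Claim_unchanged_infodd : Prop := ∀ (n : Int), Dom_infodd n → Pre_infodd n → Spec_infodd n (infodd n)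
def Claim_changed_infodd : Prop := Dom_infodd (pvDiffWitness_infodd) ∧ Pre_infodd (pvDiffWitness_infodd) ∧ D_infodd (pvDiffWitness_infodd) ∧ infodd (pvDiffWitness_infodd) = pvDiffWitnessOut_infodd.1 ∧ infodd_alt (pvDiffWitness_infodd) = pvDiffWitnessOut_infodd.2 ∧ pvDiffWitnessOut_infodd.1 ≠ pvDiffWitnessOut_infodd.2
def Claim_exact_infodd : Prop := ∀ (n : Int), Dom_infodd n → Pre_infodd n → D_infodd n → infodd n ≠ infodd_alt n

-- ===== LEMMAS AND PROOFS =====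

-- proof-side reference decimal representation: str(m) for m : Nat
def pvDigits (m : Nat) : List Char :=
  if m < 10 then [Nat.digitChar m] else pvDigits (m / 10) ++ [Nat.digitChar (m % 10)]
  termination_by m
  decreasing_by omega

-- proof-side value of a digit string (pvInt without the final cast)
def pvVal (cs : List Char) : Nat := cs.foldl (fun a c => 10 * a + (c.toNat - 48)) 0

-- proof-side digit count, reversed-inner value and palindrome of a Nat
def ddN (m : Nat) : Nat := (pvDigits m).length
def rvN (m : Nat) : Nat := pvVal (pvDigits m).dropLast.reverse
def palN (m : Nat) : Nat := m * 10 ^ (ddN m - 1) + rvN m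

theorem pvInt_eq_pvVal (cs : List Char) : pvInt cs = (pvVal cs : Int) := rfl

theorem pvDigits_lt (m : Nat) (h : m < 10) : pvDigits m = [Nat.digitChar m] := by
  rw [pvDigits, if_pos h]

theorem pvDigits_ge (m : Nat) (h : 10 ≤ m) :
    pvDigits m = pvDigits (m / 10) ++ [Nat.digitChar (m % 10)] := by
  rw [pvDigits, if_neg (by omega)]

theorem pvDigits_ne_nil (m : Nat) : pvDigits m ≠ [] := by
  rw [pvDigits]; split <;> simp

theorem toDigitsCore_eq_pvDigits :
    ∀ (fuel m : Nat) (l : List Char), m < fuel →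
      Nat.toDigitsCore 10 fuel m l = pvDigits m ++ l := by
  intro fuel
  induction fuel with
  | zero => intro m l h; omega
  | succ f ih =>
    intro m l h
    rw [Nat.toDigitsCore]
    by_cases h10 : m / 10 = 0
    · rw [if_pos h10, pvDigits_lt m (by omega)]
      have : m % 10 = m := by omega
      rw [this]
      rfl
    · have hstep : m / 10 < f := by omega
      rw [if_neg h10, ih (m / 10) ((m % 10).digitChar :: l) hstep]
      rw [pvDigits_ge m (by omega)]
      simp

theorem toChars_of_nonneg (n : Int) (h : 0 ≤ n) :
    PySem.Int.toChars n = pvDigits n.toNat := by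
  rw [PySem.Int.toChars, if_neg (by omega)]
  rw [Nat.toDigits, toDigitsCore_eq_pvDigits _ _ _ (by omega), List.append_nil]

theorem toChars_ne_nil (n : Int) : PySem.Int.toChars n ≠ [] := by
  rw [PySem.Int.toChars]
  split
  · simp
  · rw [Nat.toDigits, toDigitsCore_eq_pvDigits _ _ _ (by omega), List.append_nil]
    exact pvDigits_ne_nil _

theorem digitChar_val (d : Nat) (h : d < 10) : (Nat.digitChar d).toNat - 48 = d := by
  interval_cases d <;> decide

theorem pvVal_from (cs : List Char) :
    ∀ a : Nat, cs.foldl (fun a c => 10 * a + (c.toNat - 48)) a = a * 10 ^ cs.length + pvVal cs := by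
  induction cs with
  | nil => intro a; simp [pvVal]
  | cons c t ih =>
    intro a
    have h1 := ih (10 * a + (c.toNat - 48))
    have h2 := ih (10 * 0 + (c.toNat - 48))
    simp only [List.foldl_cons, pvVal] at *
    rw [h1, h2]
    simp only [List.length_cons, pow_succ]
    ring

theorem pvVal_append (xs ys : List Char) :
    pvVal (xs ++ ys) = pvVal xs * 10 ^ ys.length + pvVal ys := by
  simp only [pvVal]
  rw [List.foldl_append, pvVal_from]
  rfl

theorem pvVal_digits : ∀ m : Nat, pvVal (pvDigits m) = m := by
  intro m
  induction m using Nat.strong_induction_on with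
  | _ m ih =>
    rw [pvDigits]
    split
    · next h =>
      simp [pvVal, digitChar_val m h]
    · next h =>
      rw [pvVal_append, ih (m / 10) (by omega)]
      simp [pvVal, digitChar_val (m % 10) (by omega)]
      omega

theorem ddN_pos (m : Nat) : 1 ≤ ddN m := by
  have := pvDigits_ne_nil m
  unfold ddN
  cases hp : pvDigits m with
  | nil => exact absurd hp this
  | cons a t => simp

theorem ddN_lt (m : Nat) (h : m < 10) : ddN m = 1 := by
  unfold ddN; rw [pvDigits_lt m h]; rfl

theorem ddN_ge (m : Nat) (h : 10 ≤ m) : ddN m = ddN (m / 10) + 1 := by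
  unfold ddN; rw [pvDigits_ge m h]; simp

theorem dropLast_digits_small (m : Nat) (h : m < 10) : (pvDigits m).dropLast = [] := by
  rw [pvDigits, if_pos h]; rfl

theorem dropLast_digits (m : Nat) (h : 10 ≤ m) : (pvDigits m).dropLast = pvDigits (m / 10) := by
  rw [pvDigits, if_neg (by omega), List.dropLast_concat]

theorem take_digits : ∀ (j m : Nat), j < (pvDigits m).length →
    (pvDigits m).take ((pvDigits m).length - j) = pvDigits (m / 10 ^ j) := by
  intro j
  induction j with
  | zero => intro m _; simp
  | succ j ih =>
    intro m h
    have hm : 10 ≤ m := by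
      by_contra hlt
      rw [pvDigits, if_pos (by omega)] at h
      simp at h
    have hlen : (pvDigits m).length = (pvDigits (m / 10)).length + 1 := by
      rw [pvDigits, if_neg (by omega)]; simp
    rw [pvDigits, if_neg (by omega)]
    rw [pvDigits, if_neg (by omega)] at h
    simp only [List.length_append, List.length_singleton] at h ⊢
    rw [List.take_append_of_le_length (by omega)]
    have : (pvDigits (m / 10)).length + 1 - (j + 1) = (pvDigits (m / 10)).length - j := by omega
    rw [this, ih (m / 10) (by omega)]
    rw [Nat.div_div_eq_div_mul, pow_succ]
    ring_nf

-- m has exactly ddN m decimal digits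
theorem ddN_bounds : ∀ m : Nat, m < 10 ^ ddN m ∧ (ddN m = 1 ∨ 10 ^ (ddN m - 1) ≤ m) := by
  intro m
  induction m using Nat.strong_induction_on with
  | _ m ih =>
    by_cases h : m < 10
    · rw [ddN_lt m h]; omega
    · obtain ⟨ih1, ih2⟩ := ih (m / 10) (by omega)
      rw [ddN_ge m (by omega)]
      constructor
      · have : m < 10 * (m / 10 + 1) := by omega
        calc m < 10 * (m / 10 + 1) := this
          _ ≤ 10 * 10 ^ ddN (m / 10) := by omega
          _ = 10 ^ (ddN (m / 10) + 1) := by ring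
      · right
        rcases ih2 with h1 | h1
        · simp only [h1]
          omega
        · have hp := ddN_pos (m / 10)
          have : 10 ^ (ddN (m / 10) + 1 - 1) = 10 * 10 ^ (ddN (m / 10) - 1) := by
            rw [Nat.add_sub_cancel, ← pow_succ']
            congr 1
            omega
          rw [this]
          omega

theorem ddN_mono {m m' : Nat} (h : m ≤ m') : ddN m ≤ ddN m' := by
  by_contra hlt
  push_neg at hlt
  obtain ⟨hu, hl⟩ := ddN_bounds m
  obtain ⟨hu', _⟩ := ddN_bounds m'
  have h1 := ddN_pos m'
  rcases hl with h1' | h1'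
  · omega
  · have : 10 ^ ddN m' ≤ 10 ^ (ddN m - 1) :=
      Nat.pow_le_pow_right (by norm_num) (by omega)
    omega

-- every character of pvDigits m is a decimal digit
theorem pvDigits_digit : ∀ m : Nat, ∀ c ∈ pvDigits m, c.toNat - 48 < 10 := by
  intro m
  induction m using Nat.strong_induction_on with
  | _ m ih =>
    intro c hc
    by_cases h : m < 10
    · rw [pvDigits_lt m h] at hc
      simp at hc
      rw [hc, digitChar_val m h]
      exact h
    · rw [pvDigits_ge m (by omega)] at hc
      rcases List.mem_append.mp hc with h1 | h1
      · exact ih (m / 10) (by omega) c h1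
      · simp at h1
        rw [h1, digitChar_val (m % 10) (by omega)]
        omega

theorem pvVal_lt : ∀ cs : List Char, (∀ c ∈ cs, c.toNat - 48 < 10) → pvVal cs < 10 ^ cs.length := by
  intro cs
  induction cs with
  | nil => intro _; simp [pvVal]
  | cons c t ih =>
    intro h
    have hc : c.toNat - 48 < 10 := h c (by simp)
    have ht := ih (fun x hx => h x (by simp [hx]))
    have hv : pvVal (c :: t) = (c.toNat - 48) * 10 ^ t.length + pvVal t := by
      simp only [pvVal, List.foldl_cons]
      rw [pvVal_from]
      simp [pvVal]
    rw [hv]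
    simp only [List.length_cons, pow_succ]
    nlinarith

theorem rvN_lt (m : Nat) : rvN m < 10 ^ (ddN m - 1) := by
  have hlen : (pvDigits m).dropLast.reverse.length = ddN m - 1 := by
    rw [List.length_reverse, List.length_dropLast]; rfl
  have := pvVal_lt (pvDigits m).dropLast.reverse (by
    intro c hc
    exact pvDigits_digit m c (List.dropLast_sublist (pvDigits m) |>.mem (List.mem_reverse.mp hc)))
  rw [hlen] at this
  exact this

theorem palN_lb (m : Nat) : m * 10 ^ (ddN m - 1) ≤ palN m := Nat.le_add_right _ _

theorem palN_ub (m : Nat) : palN m < (m + 1) * 10 ^ (ddN m - 1) := by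
  have := rvN_lt m
  unfold palN
  nlinarith

theorem palN_mono {m m' : Nat} (h : m ≤ m') : palN m ≤ palN m' := by
  rcases Nat.lt_or_ge m m' with hlt | hge
  · have h1 := palN_ub m
    have h2 := palN_lb m'
    have h3 : (m + 1) * 10 ^ (ddN m - 1) ≤ m' * 10 ^ (ddN m - 1) :=
      Nat.mul_le_mul_right _ (by omega)
    have h4 : m' * 10 ^ (ddN m - 1) ≤ m' * 10 ^ (ddN m' - 1) :=
      Nat.mul_le_mul_left _ (Nat.pow_le_pow_right (by norm_num) (by
        have := ddN_mono (Nat.le_of_lt hlt)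
        omega))
    omega
  · have : m = m' := by omega
    rw [this]

theorem palN_self_le (m : Nat) : m ≤ palN m := by
  have h1 := palN_lb m
  have h2 : 1 ≤ 10 ^ (ddN m - 1) := Nat.one_le_pow _ _ (by norm_num)
  nlinarith

-- ----- B's loops compute rvN / the power of ten -----

theorem revLoop_nonpos (fuel : Nat) (m r : Int) (h : ¬ 0 < m) : revLoop fuel m r = r := by
  cases fuel <;> simp [revLoop, h]

theorem revLoop_eq : ∀ (x : Nat), 0 < x → ∀ (fuel : Nat), x ≤ fuel → ∀ (r : Nat),
    revLoop fuel (x : Int) (r : Int) =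
      ((List.foldl (fun a c => 10 * a + (c.toNat - 48)) r (pvDigits x).reverse : Nat) : Int) := by
  intro x
  induction x using Nat.strong_induction_on with
  | _ x ih =>
    intro hx fuel hfuel r
    obtain ⟨f, rfl⟩ : ∃ f, fuel = f + 1 := ⟨fuel - 1, by omega⟩
    rw [revLoop, if_pos (by exact_mod_cast hx)]
    have hfd : PySem.Int.floordiv (x : Int) 10 = ((x / 10 : Nat) : Int) := by
      exact_mod_cast PySem.Int.floordiv_natCast x 10
    have hmd : PySem.Int.mod (x : Int) 10 = ((x % 10 : Nat) : Int) := by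
      exact_mod_cast PySem.Int.mod_natCast x 10
    rw [hfd, hmd]
    have hacc : (10 : Int) * (r : Int) + ((x % 10 : Nat) : Int) = ((10 * r + x % 10 : Nat) : Int) := by
      push_cast; ring
    rw [hacc]
    by_cases h10 : x < 10
    · have hdiv : x / 10 = 0 := by omega
      rw [hdiv]
      rw [show ((0 : Nat) : Int) = (0 : Int) from rfl, revLoop_nonpos f 0 _ (by norm_num)]
      rw [pvDigits_lt x h10]
      simp only [List.reverse_singleton, List.foldl_cons, List.foldl_nil]
      rw [digitChar_val x h10]
      omega
    · rw [ih (x / 10) (by omega) (by omega) f (by omega) (10 * r + x % 10), pvDigits_ge x (by omega)]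
      simp only [List.reverse_append, List.reverse_singleton, List.singleton_append,
        List.foldl_cons]
      rw [digitChar_val (x % 10) (by omega)]

theorem revLoop_rvN (m : Nat) :
    revLoop (((m / 10 : Nat) : Int)).toNat ((m / 10 : Nat) : Int) 0 = ((rvN m : Nat) : Int) := by
  by_cases hc : m < 10
  · rw [Nat.div_eq_of_lt hc]
    rw [show (((0 : Nat) : Int)).toNat = 0 from rfl]
    rw [show ((0 : Nat) : Int) = (0 : Int) from rfl, revLoop_nonpos 0 0 0 (by norm_num)]
    unfold rvN
    rw [dropLast_digits_small m hc]
    rfl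
  · rw [Int.toNat_natCast]
    rw [show (0 : Int) = ((0 : Nat) : Int) from rfl,
      revLoop_eq (m / 10) (Nat.div_pos (Nat.le_of_not_lt hc) (by norm_num)) (m / 10) le_rfl 0,
      show rvN m = pvVal (pvDigits m).dropLast.reverse from rfl,
      dropLast_digits m (Nat.le_of_not_lt hc)]
    rfl

theorem wLoop_stop (fuel : Nat) (half w : Int) (h : ¬ w ≤ half) : wLoop fuel half w = w := by
  cases fuel <;> simp [wLoop, h]

theorem wLoop_spec : ∀ (fuel m w : Nat), 0 < w → m + 1 - w ≤ fuel →
    ∃ j : Nat, wLoop fuel (m : Int) (w : Int) = ((w * 10 ^ j : Nat) : Int) ∧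
      m < w * 10 ^ j ∧ (j = 0 ∨ w * 10 ^ (j - 1) ≤ m) := by
  intro fuel
  induction fuel with
  | zero =>
    intro m w hw hf
    refine ⟨0, ?_, by omega, Or.inl rfl⟩
    simp [wLoop]
  | succ f ih =>
    intro m w hw hf
    by_cases h : w ≤ m
    · obtain ⟨j, hj1, hj2, hj3⟩ := ih m (10 * w) (by omega) (by omega)
      refine ⟨j + 1, ?_, by rw [pow_succ]; nlinarith, Or.inr ?_⟩
      · rw [wLoop, if_pos (by exact_mod_cast h)]
        rw [show (10 : Int) * (w : Int) = ((10 * w : Nat) : Int) by push_cast; ring, hj1]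
        congr 1
        rw [pow_succ]
        ring
      · rcases hj3 with h0 | h0
        · subst h0; simpa using h
        · rw [Nat.add_sub_cancel]
          by_cases hj0 : j = 0
          · subst hj0; simpa using h
          · obtain ⟨j', rfl⟩ : ∃ j', j = j' + 1 := ⟨j - 1, by omega⟩
            simp only [Nat.add_sub_cancel] at h0
            calc w * 10 ^ (j' + 1) = 10 * w * 10 ^ j' := by rw [pow_succ]; ring
              _ ≤ m := h0
    · refine ⟨0, ?_, by omega, Or.inl rfl⟩
      rw [wLoop_stop _ _ _ (by push_cast; omega)]
      simp

theorem wLoop_pow (m : Nat) :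
    wLoop ((((m / 10 : Nat) : Int)).toNat + 1) ((m / 10 : Nat) : Int) 1 =
      (((10 : Nat) ^ (ddN m - 1) : Nat) : Int) := by
  rw [Int.toNat_natCast]
  obtain ⟨j, hj1, hj2, hj3⟩ := wLoop_spec (m / 10 + 1) (m / 10) 1 (by norm_num) (by omega)
  simp only [one_mul, Nat.cast_one] at hj1 hj2 hj3
  obtain ⟨hub, hlb⟩ := ddN_bounds m
  have hd1 := ddN_pos m
  obtain ⟨e, he⟩ : ∃ e, ddN m = e + 1 := ⟨ddN m - 1, by omega⟩
  have hu : m / 10 < 10 ^ e := by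
    rw [he, pow_succ] at hub
    omega
  have hj : j = e := by
    rcases hj3 with h0 | h0
    · subst h0
      norm_num at hj2
      have h1 : ddN m = 1 := ddN_lt m (by omega)
      omega
    · have hj1' : 1 ≤ j := by
        by_contra hc
        have hj0 : j = 0 := by omega
        rw [hj0] at hj2 h0
        norm_num at hj2 h0
        omega
      have c1 : j - 1 < e := by
        by_contra hc
        have : 10 ^ e ≤ 10 ^ (j - 1) := Nat.pow_le_pow_right (by norm_num) (by omega)
        omega
      by_cases he0 : e = 0
      · omega
      · have hml : 10 ^ e ≤ m := by
          rcases hlb with h1 | h1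
          · omega
          · rw [he] at h1
            simpa using h1
        have hml' : 10 ^ (e - 1) ≤ m / 10 := by
          obtain ⟨e', rfl⟩ : ∃ e', e = e' + 1 := ⟨e - 1, by omega⟩
          rw [pow_succ] at hml
          simp only [Nat.add_sub_cancel]
          omega
        have c2 : e - 1 < j := by
          by_contra hc
          have : 10 ^ j ≤ 10 ^ (e - 1) := Nat.pow_le_pow_right (by norm_num) (by omega)
          omega
        omega
  rw [he, show e + 1 - 1 = e from rfl, ← hj, ← hj1]

theorem palB_palN (m : Nat) : palB ((m : Nat) : Int) = ((palN m : Nat) : Int) := by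
  have h1 : palB ((m : Nat) : Int) =
      ((m : Nat) : Int) *
          wLoop ((PySem.Int.floordiv ((m : Nat) : Int) 10).toNat + 1)
            (PySem.Int.floordiv ((m : Nat) : Int) 10) 1 +
        revLoop (PySem.Int.floordiv ((m : Nat) : Int) 10).toNat
          (PySem.Int.floordiv ((m : Nat) : Int) 10) 0 := rfl
  rw [h1, show PySem.Int.floordiv ((m : Nat) : Int) 10 = ((m / 10 : Nat) : Int) from
    by exact_mod_cast PySem.Int.floordiv_natCast m 10]
  rw [revLoop_rvN m, wLoop_pow m]
  unfold palN
  push_cast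
  ring

-- ----- A's oddpal is palN -----

theorem oddpal_palN (c : Nat) : oddpal ((c : Nat) : Int) = ((palN c : Nat) : Int) := by
  unfold oddpal
  have htc : PySem.Int.toChars ((c : Nat) : Int) = pvDigits c := by
    rw [toChars_of_nonneg _ (by positivity), Int.toNat_natCast]
  rw [htc]
  simp only [show PySem.Chars.slice (pvDigits c) none (some (-1)) = (pvDigits c).dropLast from
      PySem.List.slice_to_neg_one _,
    show PySem.Chars.pyGet? (pvDigits c) (-1) = (pvDigits c).getLast? from
      PySem.List.pyGet?_neg_one _,
    List.getLast?_eq_some_getLast (pvDigits_ne_nil c)]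
  rw [pvInt_eq_pvVal]
  rw [List.dropLast_append_getLast (pvDigits_ne_nil c)]
  rw [pvVal_append, pvVal_digits]
  have hlr : (pvDigits c).dropLast.reverse.length = ddN c - 1 := by
    rw [List.length_reverse, List.length_dropLast]; rfl
  rw [hlr]
  unfold palN rvN
  push_cast
  ring

-- ----- binary search -----

theorem bsearch_eq (m a : Nat) (ha1 : palN a ≤ m) (ha2 : m < palN (a + 1)) :
    ∀ (fuel lo hi : Nat), hi - lo ≤ fuel → lo < hi → palN lo ≤ m → m < palN hi →
      bsearch fuel ((m : Nat) : Int) ((lo : Nat) : Int) ((hi : Nat) : Int) = ((a : Nat) : Int) := by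
  intro fuel
  induction fuel with
  | zero => intro lo hi hf hlh _ _; omega
  | succ f ih =>
    intro lo hi hf hlh hlo hhi
    -- lo ≤ a < hi
    have hla : lo ≤ a := by
      by_contra hc
      have : palN (a + 1) ≤ palN lo := palN_mono (by omega)
      omega
    have hah : a < hi := by
      by_contra hc
      have : palN hi ≤ palN a := palN_mono (by omega)
      omega
    by_cases hgap : lo + 1 = hi
    · rw [bsearch, if_neg (by push_cast; omega)]
      congr 1
      omega
    · rw [bsearch, if_pos (by push_cast; omega)]
      have hmid : PySem.Int.floordiv (((lo : Nat) : Int) + ((hi : Nat) : Int)) 2 =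
          (((lo + hi) / 2 : Nat) : Int) := by
        rw [show ((lo : Nat) : Int) + ((hi : Nat) : Int) = (((lo + hi : Nat)) : Int) by push_cast; ring]
        exact_mod_cast PySem.Int.floordiv_natCast (lo + hi) 2
      simp only [hmid, palB_palN]
      by_cases hle : palN ((lo + hi) / 2) ≤ m
      · rw [if_pos (by exact_mod_cast hle)]
        exact ih ((lo + hi) / 2) hi (by omega) (by omega) hle hhi
      · rw [if_neg (by exact_mod_cast hle)]
        exact ih lo ((lo + hi) / 2) (by omega) (by omega) hlo (by omega)

theorem palN_zero : palN 0 = 0 := by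
  unfold palN rvN ddN
  rw [pvDigits_lt 0 (by norm_num)]
  rfl

-- ----- A's result brackets m between consecutive palindromes -----

theorem join_nil_flatten : ∀ (xss : List (List Char)), PySem.Chars.join [] xss = xss.flatten := by
  intro xss
  induction xss with
  | nil => rfl
  | cons x t ih =>
    cases t with
    | nil => simp [PySem.Chars.join, List.intercalate]
    | cons y u =>
      simp only [PySem.Chars.join, List.intercalate] at *
      simp [List.intersperse] at *
      simp [ih]

theorem pvVal_nines : ∀ (k : Nat), pvVal (List.replicate k '9') = 10 ^ k - 1 := by
  intro k
  induction k with
  | zero => rfl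
  | succ k ih =>
    rw [List.replicate_succ', pvVal_append, ih]
    have h9 : pvVal ['9'] = 9 := rfl
    have hp : 0 < 10 ^ k := Nat.pow_pos (by norm_num)
    rw [h9, pow_succ]
    simp
    omega

theorem flatten_replicate_nine : ∀ k : Nat, (List.replicate k ['9']).flatten = List.replicate k '9' := by
  intro k
  induction k with
  | zero => rfl
  | succ k ih => simp [List.replicate_succ, ih]

theorem nines_full (k : Nat) :
    pvInt (PySem.Chars.join [] ((PySem.List.pyRange 0 (k : Int) 1).map (fun _ => ['9']))) =
      (10 : Int) ^ k - 1 := by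
  have hmap : (PySem.List.pyRange 0 (k : Int) 1).map (fun _ => (['9'] : List Char)) =
      List.replicate k ['9'] := by
    rw [PySem.List.pyRange_one, List.map_map]
    rw [show ((fun (_ : Int) => (['9'] : List Char)) ∘ fun (j : Nat) => (0 : Int) + (j : Int)) =
      (fun (_ : Nat) => (['9'] : List Char)) from rfl]
    rw [List.map_const', List.length_range]
    simp
  rw [hmap, join_nil_flatten, flatten_replicate_nine, pvInt_eq_pvVal, pvVal_nines]
  have h1 : (1 : Nat) ≤ 10 ^ k := Nat.one_le_pow _ _ (by norm_num)
  rw [Nat.cast_sub h1]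
  push_cast
  ring

-- A's even branch returns 10^(L/2) - 1 (for any n whose str has even, hence ≥ 2, length)
theorem infodd_even_val (n : Int) (hpar : (PySem.Int.toChars n).length % 2 = 0) :
    infodd n = (10 : Int) ^ ((PySem.Int.toChars n).length / 2) - 1 := by
  have hne := toChars_ne_nil n
  have hLpos : 0 < (PySem.Int.toChars n).length := List.length_pos_of_ne_nil hne
  set L := (PySem.Int.toChars n).length with hLdef
  have hL2 : 2 ≤ L := by omega
  have hcl : PySem.Chars.len (PySem.Int.toChars n) = (L : Int) := rfl
  have hmod : PySem.Int.mod (L : Int) 2 = ((L % 2 : Nat) : Int) := by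
    exact_mod_cast PySem.Int.mod_natCast L 2
  have htd : PySem.Int.truncdiv (L : Int) 2 = ((L / 2 : Nat) : Int) := by
    simp [PySem.Int.truncdiv, Int.tdiv_eq_ediv]
  simp only [infodd]
  rw [hcl, hmod, htd, hpar]
  rw [if_pos (by simp)]
  rw [if_neg (show ¬((((L / 2 : Nat) : Int)) == (0 : Int)) = true from by simp; omega)]
  rw [nines_full (L / 2)]

-- odd case: A returns a value a with palN a ≤ m < palN (a+1)
theorem infodd_odd_bracket (n : Int) (h0 : 0 ≤ n) (hpar : (PySem.Int.toChars n).length % 2 = 1) :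
    ∃ a : Nat, infodd n = ((a : Nat) : Int) ∧ palN a ≤ n.toNat ∧ n.toNat < palN (a + 1) := by
  have hn : n = ((n.toNat : Nat) : Int) := (Int.toNat_of_nonneg h0).symm
  set m := n.toNat with hmdef
  have hs : PySem.Int.toChars n = pvDigits m := toChars_of_nonneg n h0
  have hne := pvDigits_ne_nil m
  have hLpos : 0 < (pvDigits m).length := List.length_pos_of_ne_nil hne
  set L := (PySem.Int.toChars n).length with hLdef
  have hLm : L = (pvDigits m).length := by rw [hLdef, hs]
  have hLdd : L = ddN m := hLm
  set k := L / 2 with hkdef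
  have hk : L = 2 * k + 1 := by omega
  have hcl : PySem.Chars.len (pvDigits m) = (L : Int) := by rw [← hs]; rfl
  have hmod : PySem.Int.mod (L : Int) 2 = ((L % 2 : Nat) : Int) := by
    exact_mod_cast PySem.Int.mod_natCast L 2
  have hceil : -(PySem.Int.floordiv (-(L : Int)) 2) = ((k + 1 : Nat) : Int) := by
    rw [PySem.Int.neg_floordiv_neg_eq_iff_of_pos (by norm_num)]
    constructor <;> push_cast <;> omega
  set c := m / 10 ^ k with hcdef
  have htake : (pvDigits m).take (k + 1) = pvDigits c := by
    have := take_digits k m (by omega)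
    rw [show (pvDigits m).length - k = k + 1 from by omega] at this
    exact this
  have hslice : PySem.Chars.slice (pvDigits m) none (some ((k + 1 : Nat) : Int)) = pvDigits c := by
    rw [show PySem.Chars.slice (pvDigits m) none (some ((k + 1 : Nat) : Int)) =
      (pvDigits m).take (k + 1) from PySem.List.slice_to_natCast _ _, htake]
  have hcodeA : pvInt (pvDigits c) = ((c : Nat) : Int) := by
    rw [pvInt_eq_pvVal, pvVal_digits]
  -- digit counts
  obtain ⟨hmu, hml⟩ := ddN_bounds m
  have hml' : 10 ^ (2 * k) ≤ m ∨ k = 0 := by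
    rcases hml with h1 | h1
    · right; omega
    · left; rw [← hLdd, hk] at h1; simpa using h1
  have hmu' : m < 10 ^ (2 * k + 1) := by
    rw [← hLdd, hk] at hmu; exact hmu
  -- digit count of c is k + 1
  have hddc : ddN c = k + 1 := by
    rw [show ddN c = (pvDigits c).length from rfl, ← htake, List.length_take]
    omega
  -- the div/mod bracket for c
  have hbr := Nat.div_add_mod m (10 ^ k)
  have hpk : 0 < 10 ^ k := Nat.pow_pos (by norm_num)
  have hclo : c * 10 ^ k ≤ m := Nat.div_mul_le_self m (10 ^ k)
  have hchi : m < (c + 1) * 10 ^ k := by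
    have := Nat.mod_lt m hpk
    nlinarith [Nat.div_add_mod m (10 ^ k)]
  -- assemble A's branch
  simp only [infodd, hs, hcl, hmod]
  rw [show (L % 2 : Nat) = 1 from hpar]
  rw [if_neg (by simp)]
  rw [hceil, hslice, hcodeA, oddpal_palN c]
  by_cases hbranch : ((palN c : Nat) : Int) ≤ n
  · rw [if_pos hbranch]
    refine ⟨c, rfl, by exact_mod_cast hn ▸ hbranch, ?_⟩
    -- m < palN (c + 1)
    have hdd1 : k + 1 ≤ ddN (c + 1) := by
      have := ddN_mono (show c ≤ c + 1 by omega)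
      omega
    have : (c + 1) * 10 ^ k ≤ (c + 1) * 10 ^ (ddN (c + 1) - 1) :=
      Nat.mul_le_mul_left _ (Nat.pow_le_pow_right (by norm_num) (by omega))
    have h2 := palN_lb (c + 1)
    omega
  · rw [if_neg hbranch]
    push_neg at hbranch
    have hmc : (m : Int) < ((palN c : Nat) : Int) := hn ▸ hbranch
    have hmcN : m < palN c := by exact_mod_cast hmc
    -- k ≥ 1: for k = 0, c = m and palN m = m, contradiction
    have hk1 : 1 ≤ k := by
      by_contra hc0
      have hk0 : k = 0 := by omega
      have hcm : c = m := by rw [hcdef, hk0]; simp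
      have hm10 : m < 10 := by rw [hk0] at hmu'; simpa using hmu'
      have : palN m = m := by
        unfold palN rvN
        rw [ddN_lt m hm10, dropLast_digits_small m hm10]
        simp [pvVal]
      rw [hcm, this] at hmcN
      omega
    have hcl10 : 10 ^ k ≤ c := by
      rcases hml' with h1 | h1
      · rw [hcdef]
        rw [show 2 * k = k + k from by omega, pow_add] at h1
        exact Nat.le_div_iff_mul_le hpk |>.mpr (by nlinarith)
      · omega
    have hc1 : 1 ≤ c := by
      have : 1 ≤ 10 ^ k := Nat.one_le_pow _ _ (by norm_num)
      omega
    refine ⟨c - 1, by push_cast; omega, ?_, by rw [show c - 1 + 1 = c from by omega]; exact hmcN⟩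
    -- palN (c - 1) ≤ m
    have hddc1 : ddN (c - 1) ≤ k + 1 := by
      have := ddN_mono (show c - 1 ≤ c by omega)
      omega
    have h1 := palN_ub (c - 1)
    have h2 : (c - 1 + 1) * 10 ^ (ddN (c - 1) - 1) ≤ c * 10 ^ k := by
      rw [show c - 1 + 1 = c from by omega]
      exact Nat.mul_le_mul_left _ (Nat.pow_le_pow_right (by norm_num) (by omega))
    omega

-- even case bracket: a = 10^k - 1 where L = 2k
theorem infodd_even_bracket (n : Int) (h0 : 0 ≤ n) (hpar : (PySem.Int.toChars n).length % 2 = 0) :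
    ∃ a : Nat, infodd n = ((a : Nat) : Int) ∧ palN a ≤ n.toNat ∧ n.toNat < palN (a + 1) := by
  have hn : n = ((n.toNat : Nat) : Int) := (Int.toNat_of_nonneg h0).symm
  set m := n.toNat with hmdef
  have hs : PySem.Int.toChars n = pvDigits m := toChars_of_nonneg n h0
  have hLpos : 0 < (PySem.Int.toChars n).length :=
    List.length_pos_of_ne_nil (toChars_ne_nil n)
  set L := (PySem.Int.toChars n).length with hLdef
  set k := L / 2 with hkdef
  have hk : L = 2 * k ∧ 1 ≤ k := by omega
  have hLdd : L = ddN m := by rw [hLdef, hs]; rfl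
  obtain ⟨hmu, hml⟩ := ddN_bounds m
  have hml' : 10 ^ (2 * k - 1) ≤ m := by
    rcases hml with h1 | h1
    · omega
    · rw [← hLdd, hk.1] at h1; exact h1
  have hmu' : m < 10 ^ (2 * k) := by rw [← hLdd, hk.1] at hmu; exact hmu
  refine ⟨10 ^ k - 1, ?_, ?_, ?_⟩
  · rw [infodd_even_val n hpar, ← hLdef, ← hkdef]
    have h1 : (1 : Nat) ≤ 10 ^ k := Nat.one_le_pow _ _ (by norm_num)
    push_cast [h1]
    ring
  · -- palN (10^k - 1) ≤ m
    have hdd : ddN (10 ^ k - 1) ≤ k := by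
      by_contra hc
      obtain ⟨_, hl⟩ := ddN_bounds (10 ^ k - 1)
      rcases hl with h1 | h1
      · omega
      · have : 10 ^ k ≤ 10 ^ (ddN (10 ^ k - 1) - 1) :=
          Nat.pow_le_pow_right (by norm_num) (by omega)
        have h2 : (1 : Nat) ≤ 10 ^ k := Nat.one_le_pow _ _ (by norm_num)
        omega
    have h1 := palN_ub (10 ^ k - 1)
    have h2 : (1 : Nat) ≤ 10 ^ k := Nat.one_le_pow _ _ (by norm_num)
    have h3 : (10 ^ k - 1 + 1) * 10 ^ (ddN (10 ^ k - 1) - 1) ≤ 10 ^ k * 10 ^ (k - 1) := by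
      rw [show 10 ^ k - 1 + 1 = 10 ^ k from by omega]
      exact Nat.mul_le_mul_left _ (Nat.pow_le_pow_right (by norm_num) (by omega))
    have h4 : 10 ^ k * 10 ^ (k - 1) = 10 ^ (2 * k - 1) := by
      rw [← pow_add]
      congr 1
      omega
    omega
  · -- m < palN (10^k)
    have hdd : k + 1 ≤ ddN (10 ^ k) := by
      obtain ⟨hu, _⟩ := ddN_bounds (10 ^ k)
      by_contra hc
      have : 10 ^ ddN (10 ^ k) ≤ 10 ^ k := Nat.pow_le_pow_right (by norm_num) (by omega)
      omega
    rw [show 10 ^ k - 1 + 1 = 10 ^ k from by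
      have : (1 : Nat) ≤ 10 ^ k := Nat.one_le_pow _ _ (by norm_num)
      omega]
    have h1 := palN_lb (10 ^ k)
    have h2 : 10 ^ k * 10 ^ k ≤ 10 ^ k * 10 ^ (ddN (10 ^ k) - 1) :=
      Nat.mul_le_mul_left _ (Nat.pow_le_pow_right (by norm_num) (by omega))
    have h3 : 10 ^ k * 10 ^ k = 10 ^ (2 * k) := by rw [← pow_add]; congr 1; omega
    omega

-- main equality on nonnegative n
theorem infodd_eq_alt_of_nonneg (n : Int) (h0 : 0 ≤ n) : infodd n = infodd_alt n := by
  set m := n.toNat with hmdef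
  have hn : n = ((m : Nat) : Int) := (Int.toNat_of_nonneg h0).symm
  obtain ⟨a, ha, ha1, ha2⟩ :
      ∃ a : Nat, infodd n = ((a : Nat) : Int) ∧ palN a ≤ m ∧ m < palN (a + 1) := by
    rcases Nat.even_or_odd (PySem.Int.toChars n).length with he | ho
    · exact infodd_even_bracket n h0 (Nat.even_iff.mp he)
    · exact infodd_odd_bracket n h0 (Nat.odd_iff.mp ho)
  have halt : infodd_alt n = ((a : Nat) : Int) := by
    unfold infodd_alt
    rw [if_neg (by omega)]
    rw [hn, show ((m : Nat) : Int) + 1 = ((m + 1 : Nat) : Int) from by push_cast; ring,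
      Int.toNat_natCast]
    refine bsearch_eq m a ha1 ha2 (m + 1) 0 (m + 1) (by omega) (by omega) ?_ ?_
    · rw [palN_zero]; omega
    · have h1 := palN_self_le (m + 1)
      omega
  rw [ha, halt]

-- ===== VERDICT (by name: the statement is the Claim_ definition above) =====
theorem infodd_spec : Claim_unchanged_infodd := by
  intro n _ _ hD
  exact infodd_eq_alt_of_nonneg n (by unfold D_infodd at hD; omega)

theorem infodd_changed : Claim_changed_infodd := by
  unfold Claim_changed_infodd
  decide

theorem infodd_tight : Claim_exact_infodd := by
  intro n _ hPre hD
  unfold D_infodd at hD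
  have hpar : (PySem.Int.toChars n).length % 2 = 0 := by
    rcases hPre with h | h
    · omega
    · exact h
  rw [infodd_even_val n hpar]
  have hLpos : 0 < (PySem.Int.toChars n).length :=
    List.length_pos_of_ne_nil (toChars_ne_nil n)
  have hk : 1 ≤ (PySem.Int.toChars n).length / 2 := by omega
  have h10 : (10 : Int) ≤ 10 ^ ((PySem.Int.toChars n).length / 2) := by
    calc (10 : Int) = 10 ^ 1 := by ring
      _ ≤ 10 ^ ((PySem.Int.toChars n).length / 2) := by
        apply pow_le_pow_right₀ (by norm_num) hk
  unfold infodd_alt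
  rw [if_pos hD]
  omega
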